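-- pv_equiv track=rewrite | github.com/h-ukai/s-style-hrd | migration-src/application/models/bkdata.py | getsearchkey
-- ===== SOURCE A (Python) =====
-- def getsearchkey(l):
--     res = []
--     for i in range(0,len(l)):
--         if res:
--             res.append(l[0]+l[i])
--         else:
--             res.append(l[i])
--         for i2 in range(1,len(res)-1):
--             res.append(res[i2]+l[i])
--     return res
-- ===== SOURCE B (Python) =====
-- def getsearchkey(l):
--     # Closed form: the j-th output string is l[0] followed by l[k+1] for every
--     # set bit k of j, read low bit first; no growing list, no doubling pass.
--     if not l:
--         return []
--     n = len(l) - 1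
--     return [l[0] + ''.join(l[k + 1] for k in range(n) if (j >> k) & 1)
--             for j in range(1 << n)]
-- ===== Notes on version B (the rewrite author's own statement) =====
-- stated objective: alternative
-- what changed: Replaces A's incremental construction (a growing result list with a special-cased first append plus a frozen inner index loop re-reading earlier entries) by a closed form: output j is computed independently as l[0] joined with l[k+1] for each set bit k of j, over j in range(1 << (len(l)-1)), with no intermediate list state at all.
import Mathlib
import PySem

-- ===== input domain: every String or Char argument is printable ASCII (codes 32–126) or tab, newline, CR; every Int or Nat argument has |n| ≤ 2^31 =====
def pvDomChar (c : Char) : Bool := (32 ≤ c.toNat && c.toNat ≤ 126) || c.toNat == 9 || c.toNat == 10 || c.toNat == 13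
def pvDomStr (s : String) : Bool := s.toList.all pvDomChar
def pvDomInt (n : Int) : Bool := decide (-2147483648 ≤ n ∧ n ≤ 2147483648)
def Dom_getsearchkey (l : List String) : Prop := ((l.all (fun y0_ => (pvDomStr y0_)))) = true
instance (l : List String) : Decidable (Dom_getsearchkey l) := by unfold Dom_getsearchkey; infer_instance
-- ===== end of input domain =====

-- B replaces A's incremental list growth (special-cased first append plus a frozen
-- inner index loop) by a closed form: output j is l[0] followed by l[k+1] for every
-- set bit k of j; objective: alternative (same output-bound cost, no growing state).

-- ===== PORT A =====
-- one outer iteration of A with l0 = l[0], x = l[i]: the conditional append, then the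
-- inner loop over the range frozen at entry (Python evaluates range(1,len(res)-1) once,
-- after the append; res keeps growing while it runs, exactly as foldl does here)
def getsearchkeyBody (l0 : String) (res : List String) (x : String) : List String :=
  let res1 := if res ≠ [] then res ++ [l0 ++ x] else res ++ [x]
  (PySem.List.pyRange 1 ((res1.length : Int) - 1) 1).foldl
    (fun r i2 => r ++ [PySem.List.pyGetD r i2 "" ++ x]) res1

def getsearchkey (l : List String) : List String :=
  (PySem.List.pyRange 0 (l.length : Int) 1).foldl
    (fun res i => getsearchkeyBody (PySem.List.pyGetD l 0 "") res (PySem.List.pyGetD l i "")) []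

-- ===== PORT B =====
-- Source B: [l[0] + ''.join(l[k+1] for k in range(n) if (j >> k) & 1) for j in range(1 << n)]
-- ((j >> k) & 1) truthiness is exactly Nat.testBit; l[k+1] on l0 :: tl is tl.getD k.
def getsearchkey_alt (l : List String) : List String :=
  match l with
  | [] => []
  | l0 :: tl =>
    (List.range (2 ^ tl.length)).map (fun j =>
      l0 ++ String.join (((List.range tl.length).filter (fun k => j.testBit k)).map
        (fun k => tl.getD k "")))

-- ===== PRECONDITION & SPEC =====
def Spec_getsearchkey (l : List String) (out : List String) : Prop := out = getsearchkey_alt l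
instance (l : List String) (out : List String) : Decidable (Spec_getsearchkey l out) := by unfold Spec_getsearchkey; infer_instance

-- ===== CLAIM (what is proved, stated in full; the proofs are below) =====
def Claim_equal_getsearchkey : Prop := ∀ (l : List String), Dom_getsearchkey l → Spec_getsearchkey l (getsearchkey l)

-- ===== LEMMAS AND PROOFS =====

lemma join_nil_right (s : String) : s ++ String.join [] = s := by
  show s ++ "" = s
  simp

lemma join_foldl (l : List String) (s : String) :
    l.foldl (fun r t => r ++ t) s = s ++ String.join l := by
  induction l generalizing s with
  | nil => rw [List.foldl_nil, join_nil_right]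
  | cons a tl ih =>
    have h2 : String.join (a :: tl) = a ++ String.join tl := by
      show (a :: tl).foldl (fun r t => r ++ t) "" = _
      rw [List.foldl_cons, ih]
      simp
    rw [List.foldl_cons, ih, h2, String.append_assoc]

lemma join_append_singleton (a : List String) (x : String) :
    String.join (a ++ [x]) = String.join a ++ x := by
  show (a ++ [x]).foldl (fun r t => r ++ t) "" = _
  rw [List.foldl_append, join_foldl]
  simp [String.join]

-- A's inner loop over a frozen range appends r[a..a+k-1] each concatenated with x.
lemma inner_fold (x : String) (k : ℕ) : ∀ (a : ℕ) (r t : List String), a + k ≤ r.length →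
    (PySem.List.pyRange (a : Int) ((a : Int) + (k : Int)) 1).foldl
      (fun s i2 => s ++ [PySem.List.pyGetD s i2 "" ++ x]) (r ++ t)
    = r ++ t ++ (((r.drop a).take k).map (· ++ x)) := by
  induction k with
  | zero =>
    intro a r t h
    simp
  | succ k ih =>
    intro a r t h
    have hcons : PySem.List.pyRange (a : Int) ((a : Int) + ((k + 1 : ℕ) : Int)) 1
        = (a : Int) :: PySem.List.pyRange ((a : Int) + 1) ((a : Int) + ((k + 1 : ℕ) : Int)) 1 := by
      have hab : (a : Int) < (a : Int) + ((k + 1 : ℕ) : Int) := by push_cast; omega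
      exact PySem.List.pyRange_one_cons hab
    have halt : a < r.length := by omega
    have hget : PySem.List.pyGetD (r ++ t) (a : Int) "" = r[a] := by
      rw [PySem.List.pyGetD_natCast]
      rw [List.getD_eq_getElem?_getD, List.getElem?_append_left halt]
      simp [List.getElem?_eq_getElem halt]
    have hb : ((a : Int) + ((k + 1 : ℕ) : Int)) = (((a + 1 : ℕ) : Int) + (k : Int)) := by push_cast; omega
    rw [hcons, List.foldl_cons, hget, hb]
    have ht : r ++ t ++ [r[a] ++ x] = r ++ (t ++ [r[a] ++ x]) := by simp
    rw [show ((a : Int) + 1) = ((a + 1 : ℕ) : Int) by push_cast; ring] at *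
    rw [ht, ih (a + 1) r (t ++ [r[a] ++ x]) (by omega)]
    rw [List.drop_eq_getElem_cons halt, List.take_succ_cons, List.map_cons]
    simp

-- one outer step of A, on a nonempty accumulator headed by l0, doubles it
lemma body_double (l0 x : String) (rest : List String) :
    getsearchkeyBody l0 (l0 :: rest) x
      = (l0 :: rest) ++ (l0 :: rest).map (fun e => e ++ x) := by
  unfold getsearchkeyBody
  simp only [ne_eq, reduceCtorEq, not_false_eq_true, if_pos, List.cons_append]
  have := inner_fold x rest.length 1 (l0 :: rest) [l0 ++ x] (by simp; omega)
  norm_num at this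
  have hlen : (((l0 :: (rest ++ [l0 ++ x])).length : ℕ) : Int) - 1
      = (1 : Int) + ((rest.length : ℕ) : Int) := by simp; omega
  rw [hlen, this]
  simp

-- A's accumulated list after processing tl, starting from [l0], equals B's closed form.
lemma fold_closed (l0 : String) (tl : List String) :
    tl.foldl (getsearchkeyBody l0) [l0]
      = (List.range (2 ^ tl.length)).map (fun j =>
          l0 ++ String.join (((List.range tl.length).filter (fun k => j.testBit k)).map
            (fun k => tl.getD k ""))) := by
  induction tl using List.reverseRecOn with
  | nil =>
    simp only [List.foldl_nil, List.length_nil, pow_zero, List.range_one, List.range_zero,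
      List.filter_nil, List.map_nil, List.map_cons]
    rw [join_nil_right]
  | append_singleton tl x ih =>
    set m := tl.length with hm
    have hpow : 0 < 2 ^ m := Nat.two_pow_pos m
    rw [List.foldl_append, List.foldl_cons, List.foldl_nil, ih]
    -- the closed form for tl is nonempty and headed by l0
    obtain ⟨k, hk⟩ : ∃ k, 2 ^ m = k + 1 := ⟨2 ^ m - 1, by omega⟩
    have hhead : (List.range (2 ^ m)).map (fun j =>
        l0 ++ String.join (((List.range m).filter (fun k => j.testBit k)).map
          (fun k => tl.getD k "")))
        = l0 :: ((List.range k).map Nat.succ).map (fun j =>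
        l0 ++ String.join (((List.range m).filter (fun k => j.testBit k)).map
          (fun k => tl.getD k ""))) := by
      rw [hk, List.range_succ_eq_map, List.map_cons]
      congr 1
      rw [List.filter_eq_nil_iff.mpr (by simp [Nat.zero_testBit]), List.map_nil, join_nil_right]
    rw [hhead, body_double, ← hhead]
    -- now compare with the closed form for tl ++ [x]
    have hsplit : List.range (2 ^ (m + 1)) = List.range (2 ^ m) ++ (List.range (2 ^ m)).map (2 ^ m + ·) := by
      rw [show 2 ^ (m + 1) = 2 ^ m + 2 ^ m by ring]
      exact List.range_add
    simp only [List.length_append, List.length_singleton, ← hm, hsplit, List.map_append, List.map_map]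
    congr 1
    · -- low half: bit m is clear, getD stays in tl
      apply List.map_congr_left
      intro j hj
      rw [List.mem_range] at hj
      rw [List.range_succ, List.filter_append, List.filter_singleton]
      simp only [Nat.testBit_lt_two_pow hj, Bool.cond_false, List.append_nil]
      congr 1
      congr 1
      apply List.map_congr_left
      intro a ha
      have : a < m := List.mem_range.mp (List.mem_of_mem_filter ha)
      exact (List.getD_append tl [x] "" a this).symm
    · -- high half: bit m is set, the extra factor is exactly x
      apply List.map_congr_left
      intro j hj
      rw [List.mem_range] at hj
      simp only [Function.comp]
      rw [List.range_succ, List.filter_append, List.filter_singleton]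
      have hbm : (2 ^ m + j).testBit m = true := by
        rw [Nat.testBit_two_pow_add_eq, Nat.testBit_lt_two_pow hj]; rfl
      rw [hbm]
      have hfl : (List.range m).filter (fun k => (2 ^ m + j).testBit k)
          = (List.range m).filter (fun k => j.testBit k) := by
        apply List.filter_congr
        intro a ha
        rw [Nat.testBit_two_pow_add_gt (List.mem_range.mp ha) j]
      rw [hfl]
      simp only [Bool.cond_true]
      rw [List.map_append, List.map_singleton, join_append_singleton]
      have hgx : (tl ++ [x]).getD m "" = x := by
        rw [hm]; simp
      rw [hgx, ← String.append_assoc]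
      congr 3
      apply List.map_congr_left
      intro a ha
      have : a < m := List.mem_range.mp (List.mem_of_mem_filter ha)
      exact (List.getD_append tl [x] "" a this).symm

-- ===== VERDICT (by name: the statement is the Claim_ definition above) =====
theorem getsearchkey_spec : Claim_equal_getsearchkey := by
  intro l _
  unfold Spec_getsearchkey getsearchkey
  rw [PySem.List.foldl_pyRange_zero_pyGetD' l "" (getsearchkeyBody (PySem.List.pyGetD l 0 "")) []]
  cases l with
  | nil => rfl
  | cons l0 tl =>
    rw [List.foldl_cons]
    have h0 : PySem.List.pyGetD (l0 :: tl) 0 "" = l0 := by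
      simp [PySem.List.pyGetD_zero_cons]
    rw [h0]
    have hfirst : getsearchkeyBody l0 [] l0 = [l0] := by
      unfold getsearchkeyBody
      simp [PySem.List.pyRange_one_eq_nil]
    rw [hfirst, fold_closed]
    rfl
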